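-- pv_equiv track=rewrite | github.com/theozvill/Projet-Decision | projet.py | centroide_approbation
-- ===== SOURCE A (Python) =====
-- def centroide_approbation(cluster):
--     n = len(cluster)
--     m = len(cluster[0])
--     centroide = []
--     for j in range(m):
--         n_j1 = sum(a[j] for a in cluster)
--         if n_j1 >= n - n_j1:
--             centroide.append(1)
--         else:
--             centroide.append(0)
--     return centroide
-- ===== SOURCE B (Python) =====
-- def centroide_approbation(cluster):
--     n = len(cluster)
--     m = len(cluster[0])
--     counts = [0] * m
--     for a in cluster:
--         counts = [c + a[j] for j, c in enumerate(counts)]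
--     return [1 if 2 * c >= n else 0 for c in counts]
-- ===== Notes on version B (the rewrite author's own statement) =====
-- stated objective: alternative
-- what changed: Replaces A's column-major loop that rescans all rows for each column with a single row-major pass accumulating a per-column tally list, then one closed-form pass (2*c >= n) building the centroid.
import Mathlib
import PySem

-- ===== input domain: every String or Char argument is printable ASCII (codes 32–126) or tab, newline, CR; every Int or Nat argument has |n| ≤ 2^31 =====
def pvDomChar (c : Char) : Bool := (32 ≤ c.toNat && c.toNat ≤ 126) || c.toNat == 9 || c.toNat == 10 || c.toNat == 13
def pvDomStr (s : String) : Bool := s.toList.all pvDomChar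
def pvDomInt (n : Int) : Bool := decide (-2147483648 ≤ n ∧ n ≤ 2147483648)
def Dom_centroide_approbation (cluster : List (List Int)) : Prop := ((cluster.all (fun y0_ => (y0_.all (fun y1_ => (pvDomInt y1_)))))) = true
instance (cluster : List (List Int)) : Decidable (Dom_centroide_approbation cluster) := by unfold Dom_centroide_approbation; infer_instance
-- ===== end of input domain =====

-- B differs from A only in decomposition: one row-major pass accumulating per-column
-- tallies, then a closed-form test 2*c >= n; same value everywhere A returns.

-- ===== PORT A =====
-- literal port of A: for each column j, rescan all rows to sum column j, append 1/0
def centroide_approbation (cluster : List (List Int)) : List Int :=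
  let n : Int := cluster.length
  let m : Int := ((PySem.List.pyGet? cluster 0).getD []).length
  (PySem.List.pyRange 0 m 1).foldl (fun cent j =>
    let n_j1 := cluster.foldl (fun s a => s + (PySem.List.pyGet? a j).getD 0) 0
    if n_j1 ≥ n - n_j1 then cent ++ [(1 : Int)] else cent ++ [(0 : Int)]) []

-- ===== PORT B =====
-- literal port of Source B: counts = [0]*m; per row rebuild counts by enumerate; final comprehension
def centroide_approbation_alt (cluster : List (List Int)) : List Int :=
  let n : Int := cluster.length
  let m : Nat := ((PySem.List.pyGet? cluster 0).getD []).length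
  let counts := cluster.foldl (fun counts a =>
      (PySem.List.enumerate counts).map (fun jc => jc.2 + (PySem.List.pyGet? a jc.1).getD 0))
    (List.replicate m (0 : Int))
  counts.map (fun c => if 2 * c ≥ n then (1 : Int) else 0)

-- ===== PRECONDITION & SPEC =====
-- A raises IndexError on an empty cluster (cluster[0]) and whenever some row is shorter
-- than the first row (a[j] inside the column sum); exactly those inputs are excluded.
def Pre_centroide_approbation (cluster : List (List Int)) : Prop :=
  cluster ≠ [] ∧ ∀ a ∈ cluster, (cluster.headD []).length ≤ a.length
instance (cluster : List (List Int)) : Decidable (Pre_centroide_approbation cluster) := by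
  unfold Pre_centroide_approbation; infer_instance
def pvWitness_centroide_approbation : List (List Int) := [[1, 0], [0, 0], [1, 1]]

def Spec_centroide_approbation (cluster : List (List Int)) (out : List Int) : Prop :=
  out = centroide_approbation_alt cluster
instance (cluster : List (List Int)) (out : List Int) : Decidable (Spec_centroide_approbation cluster out) := by
  unfold Spec_centroide_approbation; infer_instance

-- ===== CLAIM (what is proved, stated in full; the proofs are below) =====
def Claim_equal_centroide_approbation : Prop := ∀ (cluster : List (List Int)),
  Dom_centroide_approbation cluster → Pre_centroide_approbation cluster →
  Spec_centroide_approbation cluster (centroide_approbation cluster)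

-- ===== LEMMAS AND PROOFS =====

-- per-column sum, as both ports compute it
def pvColS (cluster : List (List Int)) (j : Int) : Int :=
  cluster.foldl (fun s a => s + (PySem.List.pyGet? a j).getD 0) 0

theorem pvColS_nil (j : Int) : pvColS [] j = 0 := rfl

theorem pvColS_cons (a : List Int) (l : List (List Int)) (j : Int) :
    pvColS (a :: l) j = (PySem.List.pyGet? a j).getD 0 + pvColS l j := by
  simp [pvColS, PySem.List.foldl_add]

-- B's accumulation invariant: folding rows over counts represented as a map over pyRange
theorem pvB_fold (m : Nat) (l : List (List Int)) (F : Int → Int) :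
    l.foldl (fun counts a =>
        (PySem.List.enumerate counts).map (fun jc => jc.2 + (PySem.List.pyGet? a jc.1).getD 0))
      ((PySem.List.pyRange 0 m 1).map F)
    = (PySem.List.pyRange 0 m 1).map (fun j => F j + pvColS l j) := by
  induction l generalizing F with
  | nil =>
    rw [List.foldl_nil]
    apply List.map_congr_left
    intro j _
    rw [pvColS_nil, add_zero]
  | cons a l ih =>
    have hstep :
        (PySem.List.enumerate ((PySem.List.pyRange 0 m 1).map F)).map
          (fun jc => jc.2 + (PySem.List.pyGet? a jc.1).getD 0)
        = (PySem.List.pyRange 0 m 1).map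
            (fun j => F j + (PySem.List.pyGet? a j).getD 0) := by
      rw [PySem.List.enumerate_eq_map_pyRange (d := 0)]
      rw [show PySem.List.len ((PySem.List.pyRange 0 (m : Int) 1).map F) = (m : Int) from by
        simp [PySem.List.len, PySem.List.length_pyRange_one]]
      rw [List.map_map]
      apply List.map_congr_left
      intro j hj
      rw [PySem.List.mem_pyRange_one] at hj
      simp only [Function.comp]
      rw [PySem.List.pyGetD_map_pyRange_of_nonneg F (m : Int) j 0 hj.1 hj.2]
    simp only [List.foldl_cons, hstep, ih]
    apply List.map_congr_left
    intro j _
    rw [pvColS_cons]; ring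

theorem pvReplicate_eq_map (m : Nat) :
    List.replicate m (0 : Int) = (PySem.List.pyRange 0 m 1).map (fun _ => (0 : Int)) := by
  symm
  rw [List.eq_replicate_iff]
  constructor
  · simp [PySem.List.length_pyRange_one]
  · intro b hb; simp at hb; exact hb.2

theorem pvB_eq (cluster : List (List Int)) :
    centroide_approbation_alt cluster
    = (PySem.List.pyRange 0 (((PySem.List.pyGet? cluster 0).getD []).length : Int) 1).map
        (fun j => if 2 * pvColS cluster j ≥ (cluster.length : Int) then (1 : Int) else 0) := by
  unfold centroide_approbation_alt
  dsimp only
  rw [pvReplicate_eq_map, pvB_fold]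
  rw [List.map_map]
  apply List.map_congr_left
  intro j _
  simp

theorem pvA_eq (cluster : List (List Int)) :
    centroide_approbation cluster
    = (PySem.List.pyRange 0 (((PySem.List.pyGet? cluster 0).getD []).length : Int) 1).map
        (fun j => if pvColS cluster j ≥ (cluster.length : Int) - pvColS cluster j then (1 : Int) else 0) := by
  unfold centroide_approbation
  dsimp only
  rw [show (fun (cent : List Int) (j : Int) =>
        let n_j1 := cluster.foldl (fun s a => s + (PySem.List.pyGet? a j).getD 0) 0
        if n_j1 ≥ (cluster.length : Int) - n_j1 then cent ++ [(1 : Int)] else cent ++ [(0 : Int)])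
      = (fun cent j => cent ++
          [if pvColS cluster j ≥ (cluster.length : Int) - pvColS cluster j then (1 : Int) else 0])
      from by
        funext cent j
        exact (apply_ite (fun x : Int => cent ++ [x]) _ 1 0).symm]
  rw [PySem.List.foldl_append_singleton_eq_map]
  simp

-- ===== VERDICT (by name: the statement is the Claim_ definition above) =====
theorem centroide_approbation_spec : Claim_equal_centroide_approbation := by
  intro cluster _ _
  unfold Spec_centroide_approbation
  rw [pvA_eq, pvB_eq]
  apply List.map_congr_left
  intro j _
  have : (pvColS cluster j ≥ (cluster.length : Int) - pvColS cluster j)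
      ↔ (2 * pvColS cluster j ≥ (cluster.length : Int)) := by omega
  simp only [ge_iff_le] at this ⊢
  rw [if_congr this rfl rfl]
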